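-- pv_equiv track=rewrite | github.com/Ydtalel/performance-lab | task1/task1.py | array_path
-- ===== SOURCE A (Python) =====
-- def array_path(n: int, m: int) -> list[int]:
--     """
--     Вычисляет путь по круговому массиву из элементов от 1 до n с интервалом m.
--     """
--     array = list(range(1, n + 1))
--     path = []
--     current_index = 0
--
--     while len(path) < n:
--         path.append(array[current_index])
--         current_index = (current_index + m - 1) % n
--         if array[current_index] in path:
--             break
--
--     return path
-- ===== SOURCE B (Python) =====
-- def array_path(n: int, m: int) -> list[int]:
--     """
--     Closed-form: the walk visits (k*(m-1)) % n for k = 0..period-1, where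
--     period = n // gcd(n, (m-1) % n) is the index of the first revisit.
--     """
--     if n <= 0:
--         return []
--     step = (m - 1) % n
--     a, b = n, step
--     while b > 0:
--         a, b = b, a % b
--     period = n // a
--     return [(k * step) % n + 1 for k in range(period)]
-- ===== Notes on version B (the rewrite author's own statement) =====
-- stated objective: faster
-- what changed: Replaces A's step-by-step walk with its linear 'in path' membership test per step by a closed form: the visited cells are (k*(m-1)) % n + 1 for k below the cycle length n // gcd(n, (m-1) % n), computed with one Euclid gcd loop and a single list comprehension.
import Mathlib
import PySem

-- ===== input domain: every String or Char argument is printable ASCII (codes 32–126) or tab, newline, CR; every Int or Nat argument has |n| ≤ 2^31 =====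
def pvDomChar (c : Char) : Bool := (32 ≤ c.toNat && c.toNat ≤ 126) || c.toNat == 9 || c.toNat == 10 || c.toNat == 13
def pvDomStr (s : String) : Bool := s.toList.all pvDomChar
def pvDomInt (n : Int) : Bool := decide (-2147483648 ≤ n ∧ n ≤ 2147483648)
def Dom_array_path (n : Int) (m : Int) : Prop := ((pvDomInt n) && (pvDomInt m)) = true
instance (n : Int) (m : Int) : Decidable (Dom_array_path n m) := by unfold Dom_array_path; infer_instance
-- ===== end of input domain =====

-- B replaces A's step-and-check walk (linear membership test each step) by the closed form
-- [(k*(m-1)) % n + 1 for k < n // gcd(n, (m-1) % n)]; objective: faster.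

-- ===== PORT A =====
-- the while loop of A; fuel = n - len(path) iterations remain at most (path grows by 1 each turn).
-- array[i] is ported with pyGet? + getD 0; the index is always in range, so the default is never used.
def array_path_go (n m : Int) (array : List Int) : Nat → List Int → Int → List Int
  | 0, path, _ => path
  | fuel+1, path, cur =>
    if (path.length : Int) < n then
      let path' := path ++ [(PySem.List.pyGet? array cur).getD 0]
      let cur' := PySem.Int.mod (cur + m - 1) n
      if (PySem.List.pyGet? array cur').getD 0 ∈ path' then path'
      else array_path_go n m array fuel path' cur'
    else path

def array_path (n : Int) (m : Int) : List Int :=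
  array_path_go n m (PySem.List.pyRange 1 (n+1) 1) n.toNat [] 0

-- ===== PORT B =====
-- Source B's Euclid loop `while b > 0: a, b = b, a % b`
def array_path_gcd (a b : Int) : Int :=
  if h : 0 < b then array_path_gcd b (PySem.Int.mod a b) else a
termination_by b.toNat
decreasing_by
  have h1 := PySem.Int.mod_nonneg a h
  have h2 := PySem.Int.mod_lt a h
  omega

def array_path_alt (n : Int) (m : Int) : List Int :=
  if n ≤ 0 then []
  else
    let step := PySem.Int.mod (m - 1) n
    let g := array_path_gcd n step
    let period := PySem.Int.floordiv n g
    (PySem.List.pyRange 0 period 1).map (fun k => PySem.Int.mod (k * step) n + 1)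

-- ===== PRECONDITION & SPEC =====
def Spec_array_path (n : Int) (m : Int) (out : List Int) : Prop := out = array_path_alt n m
instance (n : Int) (m : Int) (out : List Int) : Decidable (Spec_array_path n m out) := by unfold Spec_array_path; infer_instance

-- ===== CLAIM (what is proved, stated in full; the proofs are below) =====
def Claim_equal_array_path : Prop := ∀ (n : Int) (m : Int), Dom_array_path n m → Spec_array_path n m (array_path n m)

-- ===== LEMMAS AND PROOFS =====

theorem gcd_eq (N : Nat) : ∀ (a b : Int), b.toNat ≤ N → 0 ≤ a →
    array_path_gcd a b = ((Nat.gcd b.toNat a.toNat : Nat) : Int) := by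
  induction N with
  | zero =>
    intro a b hN ha
    rw [array_path_gcd]
    rw [dif_neg (by omega)]
    have : b.toNat = 0 := by omega
    rw [this, Nat.gcd_zero_left, Int.toNat_of_nonneg ha]
  | succ N ih =>
    intro a b hN ha
    rw [array_path_gcd]
    by_cases h : 0 < b
    · rw [dif_pos h]
      have h1 := PySem.Int.mod_nonneg a h
      have h2 := PySem.Int.mod_lt a h
      rw [ih b (PySem.Int.mod a b) (by omega) h.le]
      have hmod : PySem.Int.mod a b = ((a.toNat % b.toNat : Nat) : Int) := by
        rw [PySem.Int.mod_eq_emod_of_pos h, Int.natCast_emod,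
          Int.toNat_of_nonneg ha, Int.toNat_of_nonneg h.le]
      rw [hmod, Int.toNat_natCast, ← Nat.gcd_rec]
    · rw [dif_neg h]
      have : b.toNat = 0 := by omega
      rw [this, Nat.gcd_zero_left, Int.toNat_of_nonneg ha]

theorem key_dvd (N s : Nat) : N ∣ (N / Nat.gcd N s) * s := by
  obtain ⟨s', hs'⟩ := Nat.gcd_dvd_right N s
  refine ⟨s', ?_⟩
  calc (N / Nat.gcd N s) * s = (N / Nat.gcd N s) * (Nat.gcd N s * s') := by rw [← hs']
    _ = ((N / Nat.gcd N s) * Nat.gcd N s) * s' := by ring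
    _ = N * s' := by rw [Nat.div_mul_cancel (Nat.gcd_dvd_left N s)]
theorem key_not_dvd (N s d : Nat) (hN : 0 < N) (hd : 0 < d)
    (hdp : d < N / Nat.gcd N s) : ¬ N ∣ d * s := by
  intro hdvd
  have hg : 0 < Nat.gcd N s := Nat.gcd_pos_of_pos_left _ hN
  have hco : Nat.Coprime (N / Nat.gcd N s) (s / Nat.gcd N s) := Nat.coprime_div_gcd_div_gcd hg
  have hN' : Nat.gcd N s * (N / Nat.gcd N s) = N := Nat.mul_div_cancel' (Nat.gcd_dvd_left N s)
  have hs' : Nat.gcd N s * (s / Nat.gcd N s) = s := Nat.mul_div_cancel' (Nat.gcd_dvd_right N s)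
  have h2 : (N / Nat.gcd N s) ∣ d * (s / Nat.gcd N s) := by
    have h3 : Nat.gcd N s * (N / Nat.gcd N s) ∣ Nat.gcd N s * (d * (s / Nat.gcd N s)) := by
      rw [hN']
      have he : d * s = Nat.gcd N s * (d * (s / Nat.gcd N s)) := by
        conv_lhs => rw [← hs']
        ring
      exact he ▸ hdvd
    exact (mul_dvd_mul_iff_left (by omega : Nat.gcd N s ≠ 0)).mp h3
  have hpd := Nat.le_of_dvd hd (hco.dvd_of_dvd_mul_right h2)
  omega

-- value of array[j] for j < N
theorem arr_get (n : Int) (N : Nat) (hn : n = (N : Int)) (j : Nat) (hj : j < N) :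
    (PySem.List.pyGet? (PySem.List.pyRange 1 (n+1) 1) (j : Int)).getD 0 = (j : Int) + 1 := by
  rw [PySem.List.pyGet?_natCast, PySem.List.getElem?_pyRange_one]
  rw [if_pos (by omega : j < ((n:Int) + 1 - 1).toNat)]
  simp [add_comm]

-- the advanced index
theorem cur_step (n m : Int) (N s : Nat) (hn : n = (N : Int)) (hN : 0 < N)
    (hstep : PySem.Int.mod (m-1) n = (s : Int)) (k : Nat) :
    PySem.Int.mod (((k*s) % N : Nat) + m - 1) n = ((((k+1)*s) % N : Nat) : Int) := by
  have hnpos : (0:Int) < n := by omega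
  rw [PySem.Int.mod_eq_emod_of_pos hnpos]
  have h1 : ((((k*s) % N : Nat) : Int) + m - 1) = (((k*s) % N : Nat) : Int) + (m - 1) := by ring
  rw [h1, Int.add_emod]
  rw [show (m-1) % n = (s:Int) from by rw [← PySem.Int.mod_eq_emod_of_pos hnpos, hstep]]
  rw [hn, ← Int.natCast_emod, ← Int.natCast_add, ← Int.natCast_emod]
  congr 1
  rw [Nat.mod_mod_of_dvd _ dvd_rfl, Nat.mod_add_mod, Nat.succ_mul]

theorem loop_lemma (n m : Int) (N s : Nat) (hn : n = (N : Int)) (hN : 0 < N)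
    (hstep : PySem.Int.mod (m-1) n = (s : Int)) :
    ∀ (fuel k : Nat), k < N / Nat.gcd N s → N - k = fuel →
    array_path_go n m (PySem.List.pyRange 1 (n+1) 1) fuel
      ((List.range k).map (fun j => ((((j*s) % N : Nat)) : Int) + 1)) (((k*s) % N : Nat) : Int)
    = (List.range (N / Nat.gcd N s)).map (fun j => ((((j*s) % N : Nat)) : Int) + 1) := by
  have hg : 0 < Nat.gcd N s := Nat.gcd_pos_of_pos_left _ hN
  have hpN : N / Nat.gcd N s ≤ N := Nat.div_le_self _ _
  intro fuel
  induction fuel with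
  | zero => intro k hk hfk; omega
  | succ fuel ih =>
    intro k hk hfk
    have hkN : k < N := lt_of_lt_of_le hk hpN
    rw [array_path_go]
    rw [if_pos (by simp [hn]; omega)]
    rw [arr_get n N hn _ (Nat.mod_lt _ hN)]
    rw [cur_step n m N s hn hN hstep k]
    dsimp only
    rw [arr_get n N hn _ (Nat.mod_lt _ hN)]
    have hpath : (List.range k).map (fun j => ((((j*s) % N : Nat)) : Int) + 1) ++ [(((k*s) % N : Nat) : Int) + 1]
        = (List.range (k+1)).map (fun j => ((((j*s) % N : Nat)) : Int) + 1) := by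
      rw [List.range_succ, List.map_append]; rfl
    rw [hpath]
    by_cases hkp : k + 1 = N / Nat.gcd N s
    · rw [if_pos]
      · rw [hkp]
      · -- f (k+1) = f 0 = 1: member at j = 0
        have hz : ((k+1)*s) % N = 0 := by
          rw [hkp]; exact Nat.dvd_iff_mod_eq_zero.mp (key_dvd N s)
        exact List.mem_map.mpr ⟨0, List.mem_range.mpr (by omega), by simp [hz]⟩
    · rw [if_neg]
      · exact ih (k+1) (by omega) (by omega)
      · -- no membership: values distinct below p
        intro hmem
        rw [List.mem_map] at hmem
        obtain ⟨j, hj, hje⟩ := hmem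
        rw [List.mem_range] at hj
        have heqn : (j*s) % N = ((k+1)*s) % N := by exact_mod_cast add_right_cancel hje
        have hdvd : N ∣ ((k+1) - j) * s := by
          rw [Nat.sub_mul]
          exact (Nat.modEq_iff_dvd' (Nat.mul_le_mul_right s (by omega))).mp heqn
        exact key_not_dvd N s ((k+1) - j) hN (by omega) (by omega) hdvd

-- ===== VERDICT (by name: the statement is the Claim_ definition above) =====
theorem array_path_spec : Claim_equal_array_path := by
  intro n m _
  unfold Spec_array_path
  by_cases hn : n ≤ 0
  · simp [array_path, array_path_alt, Int.toNat_of_nonpos hn, array_path_go, hn]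
  · rw [not_le] at hn
    set N := n.toNat with hNdef
    have hn' : n = (N:Int) := (Int.toNat_of_nonneg hn.le).symm
    have hN : 0 < N := by omega
    have hs0 := PySem.Int.mod_nonneg (m-1) hn
    have hslt := PySem.Int.mod_lt (m-1) hn
    set s := (PySem.Int.mod (m-1) n).toNat with hsdef
    have hstep : PySem.Int.mod (m-1) n = (s:Int) := (Int.toNat_of_nonneg hs0).symm
    have hsN : s < N := by omega
    have hg : 0 < Nat.gcd N s := Nat.gcd_pos_of_pos_left _ hN
    have hp : 0 < N / Nat.gcd N s := Nat.div_pos (Nat.le_of_dvd hN (Nat.gcd_dvd_left N s)) hg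
    have hA : array_path n m
        = (List.range (N / Nat.gcd N s)).map (fun j => ((((j*s) % N : Nat)) : Int) + 1) := by
      have hl := loop_lemma n m N s hn' hN hstep N 0 hp (by omega)
      unfold array_path
      simpa using hl
    have hB : array_path_alt n m
        = (List.range (N / Nat.gcd N s)).map (fun j => ((((j*s) % N : Nat)) : Int) + 1) := by
      unfold array_path_alt
      rw [if_neg (by omega), hstep]
      dsimp only
      rw [show array_path_gcd n (s:Int) = ((Nat.gcd N s : Nat) : Int) from by
        rw [gcd_eq s n (s:Int) (by simp) hn.le, hn']; simp [Nat.gcd_comm]]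
      rw [hn', PySem.Int.floordiv_natCast, PySem.List.pyRange_zero_nat, List.map_map]
      apply List.map_congr_left
      intro j _
      dsimp only [Function.comp]
      rw [← Int.natCast_mul, PySem.Int.mod_natCast]
    rw [hA, hB]
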